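-- pv_equiv track=rewrite | github.com/allthriveai/allthriveai | services/agents/proactive/struggle_detector.py | _check_topic_repetition
-- ===== SOURCE A (Python) =====
-- def _check_topic_repetition(messages: list[dict]) -> bool:
--     """Check if user is asking about the same topic repeatedly."""
--     if len(messages) < 2:
--         return False
--
--     # Simple heuristic: check for significant word overlap
--     words_per_message: list[set[str]] = []
--     for msg in messages:
--         content = msg.get('content', '').lower()
--         # Extract meaningful words (>3 chars, not common)
--         common = {'the', 'and', 'but', 'for', 'are', 'not', 'you', 'all', 'can', 'this', 'that', 'with', 'have'}
--         words = {w for w in content.split() if len(w) > 3 and w not in common}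
--         words_per_message.append(words)
--
--     if len(words_per_message) < 2:
--         return False
--
--     # Check overlap between last message and previous ones
--     last_words = words_per_message[-1]
--     if not last_words:
--         return False
--
--     for earlier_words in words_per_message[:-1]:
--         overlap = last_words & earlier_words
--         if len(overlap) >= 2:  # At least 2 significant words in common
--             return True
--
--     return False
-- ===== SOURCE B (Python) =====
-- _COMMON = {'the', 'and', 'but', 'for', 'are', 'not', 'you', 'all', 'can', 'this', 'that', 'with', 'have'}
--
--
-- def _significant(msg):
--     content = msg.get('content', '').lower()
--     return {w for w in content.split() if len(w) > 3 and w not in _COMMON}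
--
--
-- def _check_topic_repetition(messages: list[dict]) -> bool:
--     """Inverted-index variant: map each significant word to the list of earlier
--     messages containing it, then scan the last message's significant words,
--     bumping a per-earlier-message counter via the index; True as soon as any
--     counter reaches 2."""
--     if len(messages) < 2:
--         return False
--     last_words = _significant(messages[-1])
--     if not last_words:
--         return False
--     index = {}
--     for i, msg in enumerate(messages[:-1]):
--         for w in _significant(msg):
--             index[w] = index.get(w, []) + [i]
--     counts = {}
--     for w in last_words:
--         for i in index.get(w, []):
--             counts[i] = counts.get(i, 0) + 1
--             if counts[i] >= 2:
--                 return True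
--     return False
-- ===== Notes on version B (the rewrite author's own statement) =====
-- stated objective: alternative
-- what changed: Instead of building a word set per message and intersecting the last one with each earlier set, B builds an inverted index (dict word -> list of earlier-message indices) in one pass, then walks the last message's significant words through the index, incrementing a per-message counter and returning True as soon as any counter reaches 2.
import Mathlib
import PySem

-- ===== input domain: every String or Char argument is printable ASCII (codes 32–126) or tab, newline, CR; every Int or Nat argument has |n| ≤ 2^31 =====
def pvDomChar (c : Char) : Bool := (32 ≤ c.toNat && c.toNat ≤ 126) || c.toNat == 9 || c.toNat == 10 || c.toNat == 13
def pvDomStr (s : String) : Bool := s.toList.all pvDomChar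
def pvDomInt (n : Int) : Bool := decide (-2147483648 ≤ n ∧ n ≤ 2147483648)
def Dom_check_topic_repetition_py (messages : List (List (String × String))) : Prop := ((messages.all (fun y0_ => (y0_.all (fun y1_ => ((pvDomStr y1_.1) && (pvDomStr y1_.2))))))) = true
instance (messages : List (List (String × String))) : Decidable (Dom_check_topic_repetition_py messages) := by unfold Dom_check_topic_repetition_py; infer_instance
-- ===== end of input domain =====

-- B replaces A's per-earlier-message set intersections by an inverted index (word -> list of
-- earlier-message indices) plus per-message hit counters with early exit; objective: alternative
-- data structure, same result.

-- ===== PORT A =====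
def pvCommon : PySem.Set String :=
  PySem.Set.ofList ["the", "and", "but", "for", "are", "not", "you", "all", "can", "this", "that", "with", "have"]

def check_topic_repetition_py (messages : List (List (String × String))) : Bool :=
  if messages.length < 2 then false
  else
    let words_per_message : List (PySem.Set String) :=
      messages.foldl (fun acc msg =>
        let content := PySem.Str.lower (PySem.Dict.getD (PySem.Dict.ofList msg) "content" "")
        let common := pvCommon
        let words : PySem.Set String :=
          PySem.Set.ofList ((PySem.Str.split₀ content).filter
            (fun w => decide (3 < PySem.Str.len w) && !(PySem.Set.contains common w)))
        acc ++ [words]) []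
    if words_per_message.length < 2 then false
    else
      let last_words := PySem.List.pyGetD words_per_message (-1) PySem.Set.empty
      if PySem.Set.len last_words = 0 then false
      else
        (PySem.List.slice words_per_message none (some (-1))).any
          (fun earlier_words => decide (2 ≤ PySem.Set.len (PySem.Set.inter last_words earlier_words)))

-- ===== PORT B =====
-- helper _significant(msg) of Source B
def pvSigWords (msg : List (String × String)) : PySem.Set String :=
  let content := PySem.Str.lower (PySem.Dict.getD (PySem.Dict.ofList msg) "content" "")
  PySem.Set.ofList ((PySem.Str.split₀ content).filter
    (fun w => decide (3 < PySem.Str.len w) && !(PySem.Set.contains pvCommon w)))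

def check_topic_repetition_py_alt (messages : List (List (String × String))) : Bool :=
  if messages.length < 2 then false
  else
    let last_words := pvSigWords (PySem.List.pyGetD messages (-1) [])
    if last_words.isEmpty then false
    else
      -- index[w] = index.get(w, []) + [i]  over enumerate(messages[:-1]), w in _significant(msg)
      let index : PySem.Dict String (List Int) :=
        (PySem.List.enumerate (PySem.List.slice messages none (some (-1)))).foldl
          (fun d p => (pvSigWords p.2 : List String).foldl
            (fun d w => d.modify w [] (fun l => l ++ [p.1])) d)
          PySem.Dict.empty
      -- counts[i] = counts.get(i, 0) + 1; early return once any counter reaches 2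
      let res : PySem.Dict Int Int × Bool :=
        (last_words : List String).foldl
          (fun st w => (index.getD w []).foldl
            (fun st i =>
              if st.2 then st
              else
                let counts := st.1.modify i 0 (· + 1)
                (counts, decide (2 ≤ counts.getD i 0))) st)
          (PySem.Dict.empty, false)
      res.2

-- ===== PRECONDITION & SPEC =====
def Spec_check_topic_repetition_py (messages : List (List (String × String))) (out : Bool) : Prop := out = check_topic_repetition_py_alt messages
instance (messages : List (List (String × String))) (out : Bool) : Decidable (Spec_check_topic_repetition_py messages out) := by unfold Spec_check_topic_repetition_py; infer_instance

-- ===== CLAIM (what is proved, stated in full; the proofs are below) =====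
def Claim_equal_check_topic_repetition_py : Prop := ∀ (messages : List (List (String × String))), Dom_check_topic_repetition_py messages → Spec_check_topic_repetition_py messages (check_topic_repetition_py messages)

-- ===== LEMMAS AND PROOFS =====

-- B's inner counting step (definitionally the lambda inside the port of B).
def pvCStep (st : PySem.Dict Int Int × Bool) (i : Int) : PySem.Dict Int Int × Bool :=
  if st.2 then st
  else
    let counts := st.1.modify i 0 (· + 1)
    (counts, decide (2 ≤ counts.getD i 0))

lemma pv_cstep_sticky (l : List Int) (st : PySem.Dict Int Int × Bool) (h : st.2 = true) :
    l.foldl pvCStep st = st := by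
  induction l with
  | nil => rfl
  | cons a t ih => simp [List.foldl_cons, pvCStep, h, ih]

-- The counting loop raises the flag iff some index reaches a running total of 2.
lemma pv_count_loop (l : List Int) (d : PySem.Dict Int Int) (hd : ∀ j, d.getD j 0 < 2) :
    ((l.foldl pvCStep (d, false)).2 = true) ↔ ∃ j : Int, 2 ≤ d.getD j 0 + (l.count j : Int) := by
  induction l generalizing d with
  | nil =>
    simp only [List.foldl_nil, List.count_nil]
    constructor
    · intro h; exact absurd h (by simp)
    · rintro ⟨j, hj⟩; exact absurd (hd j) (by push_cast at hj ⊢; omega)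
  | cons i t ih =>
    rw [List.foldl_cons]
    have hself : (d.modify i 0 (· + 1)).getD i 0 = d.getD i 0 + 1 := PySem.Dict.getD_modify_self _ _ _ _
    show ((t.foldl pvCStep (pvCStep (d, false) i)).2 = true) ↔ _
    simp only [pvCStep, hself]
    by_cases hc : 2 ≤ d.getD i 0 + 1
    · rw [if_neg (by simp)]
      simp only [hc, decide_true]
      rw [pv_cstep_sticky t _ rfl]
      simp only [true_iff]
      exact ⟨i, by rw [List.count_cons]; simp only [BEq.rfl, if_true]; push_cast; omega⟩
    · rw [if_neg (by simp)]
      simp only [hc, decide_false]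
      have hd' : ∀ j, (d.modify i 0 (· + 1)).getD j 0 < 2 := by
        intro j
        rw [PySem.Dict.getD_modify]
        split_ifs with h
        · subst h; omega
        · exact hd j
      rw [ih _ hd']
      constructor
      · rintro ⟨j, hj⟩
        refine ⟨j, ?_⟩
        rw [List.count_cons]
        rw [PySem.Dict.getD_modify] at hj
        split_ifs at hj with h
        · subst h; simp only [BEq.rfl, if_pos]; push_cast at hj ⊢; omega
        · have hne : (i == j) = false := by simp; omega
          rw [hne]; simpa using hj
      · rintro ⟨j, hj⟩
        refine ⟨j, ?_⟩
        rw [PySem.Dict.getD_modify]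
        rw [List.count_cons] at hj
        split_ifs with h
        · subst h; simp only [BEq.rfl, if_pos] at hj; push_cast at hj ⊢; omega
        · have hne : (i == j) = false := by simp; omega
          rw [hne] at hj; simpa using hj

-- nested foldl = foldl over the flattened list
lemma pv_foldl_flatMap {α β σ : Type} (l : List α) (f : α → List β) (g : σ → β → σ) (s : σ) :
    l.foldl (fun s x => (f x).foldl g s) s = (l.flatMap f).foldl g s := by
  induction l generalizing s with
  | nil => rfl
  | cons a t ih => simp [List.flatMap_cons, List.foldl_append, ih]

-- the index's entry for word w (the dict is B's index over the earlier messages)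
def pvOcc (earlier : List (List (String × String))) (w : String) : List Int :=
  ((PySem.List.enumerate earlier).foldl
    (fun d p => (pvSigWords p.2 : List String).foldl
      (fun d w => d.modify w [] (fun l => l ++ [p.1])) d)
    PySem.Dict.empty).getD w []

lemma pv_nodup_sig (msg : List (String × String)) : (pvSigWords msg : List String).Nodup :=
  PySem.Set.nodup_ofList _

lemma pv_occ_eq (earlier : List (List (String × String))) (w : String) :
    pvOcc earlier w
      = (PySem.List.enumerate earlier).flatMap
          (fun p => if (pvSigWords p.2).contains w then [p.1] else []) := by
  unfold pvOcc
  have h1 : (fun (d : PySem.Dict String (List Int)) (p : Int × List (String × String)) =>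
        (pvSigWords p.2 : List String).foldl (fun d w => d.modify w [] (fun l => l ++ [p.1])) d)
      = fun d p => ((pvSigWords p.2).map (fun w => (w, p.1))).foldl
          (fun d q => d.modify q.1 [] (fun l => l ++ [q.2])) d := by
    funext d p; rw [List.foldl_map]
  rw [h1, pv_foldl_flatMap, PySem.Dict.getD_foldl_modify_append]
  rw [List.filter_flatMap, List.map_flatMap]
  simp only [PySem.Dict.getD_empty, List.nil_append]
  have h2 : (fun (p : Int × List (String × String)) =>
        (((pvSigWords p.2).map (fun w => (w, p.1))).filter (fun q => q.1 == w)).map (·.2))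
      = fun p => if (pvSigWords p.2).contains w then [p.1] else [] := by
    funext p
    rw [List.filter_map, List.map_map]
    simp only [Function.comp_def]
    by_cases hw : w ∈ (pvSigWords p.2 : List String)
    · rw [List.filter_beq, List.Nodup.count (pv_nodup_sig p.2)]
      simp [hw]
    · rw [List.filter_beq, List.Nodup.count (pv_nodup_sig p.2)]
      simp [hw]
  rw [h2]

lemma pv_flat_count {α : Type} (j : Int) (l : List (Int × α)) (c : α → Bool) :
    (((l.flatMap (fun p => if c p.2 then [p.1] else [])).count j : Int))
      = (l.map (fun p => if p.1 = j then (if c p.2 then (1:Int) else 0) else 0)).sum := by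
  induction l with
  | nil => simp
  | cons q t ih =>
    rw [List.flatMap_cons, List.count_append, List.map_cons, List.sum_cons]
    push_cast
    rw [← ih]
    have : ((if c q.2 then [q.1] else []).count j : Int)
        = if q.1 = j then (if c q.2 then (1:Int) else 0) else 0 := by
      by_cases hc : c q.2 <;> by_cases he : q.1 = j <;> simp [hc, he]
    rw [this]

-- total hits of earlier-message index j over the last message's words = word-overlap count
lemma pv_seq_count (earlier : List (List (String × String))) (last : List String) (j : Int) :
    ((last.flatMap (fun w => pvOcc earlier w)).count j : Int)
      = ((PySem.List.enumerate earlier).map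
          (fun p => if p.1 = j then (last.countP (fun w => (pvSigWords p.2).contains w) : Int) else 0)).sum := by
  induction last with
  | nil =>
    simp only [List.flatMap_nil, List.count_nil, Nat.cast_zero, List.countP_nil]
    symm
    apply List.sum_eq_zero
    intro x hx
    obtain ⟨p, hp, rfl⟩ := List.mem_map.mp hx
    split_ifs <;> rfl
  | cons w t ih =>
    rw [List.flatMap_cons, List.count_append]
    push_cast
    rw [ih, pv_occ_eq earlier w, pv_flat_count j _ (fun m => (pvSigWords m).contains w)]
    have hsplit : (fun (p : Int × List (String × String)) =>
          if p.1 = j then ((w :: t).countP (fun w' => (pvSigWords p.2).contains w') : Int) else 0)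
        = fun p => (if p.1 = j then (if (pvSigWords p.2).contains w then (1:Int) else 0) else 0)
            + (if p.1 = j then (t.countP (fun w' => (pvSigWords p.2).contains w') : Int) else 0) := by
      funext p
      rw [List.countP_cons]
      split_ifs <;> push_cast <;> omega
    rw [hsplit, PySem.List.sum_map_add_int]

-- a sum over distinct indices reaches 2 somewhere iff one of its contributions does
lemma pv_exists_sum {α : Type} (l : List (Int × α)) (X : Int × α → Int)
    (hl : l.Pairwise (fun p q => p.1 < q.1)) (hX : ∀ p, 0 ≤ X p) :
    (∃ j : Int, 2 ≤ (l.map (fun p => if p.1 = j then X p else 0)).sum) ↔ ∃ p ∈ l, 2 ≤ X p := by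
  induction l with
  | nil => simp
  | cons q t ih =>
    rw [List.pairwise_cons] at hl
    constructor
    · rintro ⟨j, hj⟩
      rw [List.map_cons, List.sum_cons] at hj
      by_cases he : q.1 = j
      · subst he
        have hz : (t.map (fun p => if p.1 = q.1 then X p else 0)).sum = 0 := by
          apply List.sum_eq_zero
          intro x hx
          obtain ⟨p, hp, rfl⟩ := List.mem_map.mp hx
          have := hl.1 p hp
          simp [show ¬(p.1 = q.1) by omega]
        rw [if_pos rfl, hz] at hj
        exact ⟨q, List.mem_cons_self, by omega⟩
      · rw [if_neg he] at hj
        obtain ⟨p, hp, h2⟩ := (ih hl.2).mp ⟨j, by omega⟩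
        exact ⟨p, List.mem_cons_of_mem _ hp, h2⟩
    · rintro ⟨p, hp, h2⟩
      rcases List.mem_cons.mp hp with rfl | hp'
      · refine ⟨p.1, ?_⟩
        rw [List.map_cons, List.sum_cons, if_pos rfl]
        have hz : (t.map (fun r => if r.1 = p.1 then X r else 0)).sum = 0 := by
          apply List.sum_eq_zero
          intro x hx
          obtain ⟨r, hr, rfl⟩ := List.mem_map.mp hx
          have := hl.1 r hr
          simp [show ¬(r.1 = p.1) by omega]
        omega
      · obtain ⟨j, hj⟩ := (ih hl.2).mpr ⟨p, hp', h2⟩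
        refine ⟨j, ?_⟩
        rw [List.map_cons, List.sum_cons]
        have : 0 ≤ (if q.1 = j then X q else 0) := by
          split_ifs
          · exact hX q
          · omega
        omega

set_option maxHeartbeats 1000000 in
lemma pv_main : ∀ m, check_topic_repetition_py m = check_topic_repetition_py_alt m := by
  intro messages
  unfold check_topic_repetition_py check_topic_repetition_py_alt
  by_cases h : messages.length < 2
  · simp [h]
  · simp only [if_neg h]
    show (if (List.foldl (fun acc msg => acc ++ [pvSigWords msg]) ([] : List (PySem.Set String)) messages).length < 2 then false
          else if PySem.Set.len (PySem.List.pyGetD (List.foldl (fun acc msg => acc ++ [pvSigWords msg]) ([] : List (PySem.Set String)) messages) (-1) PySem.Set.empty) = 0 then false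
          else (PySem.List.slice (List.foldl (fun acc msg => acc ++ [pvSigWords msg]) ([] : List (PySem.Set String)) messages) none (some (-1))).any
            (fun earlier_words => decide (2 ≤ PySem.Set.len (PySem.Set.inter (PySem.List.pyGetD (List.foldl (fun acc msg => acc ++ [pvSigWords msg]) ([] : List (PySem.Set String)) messages) (-1) PySem.Set.empty) earlier_words)))) =
         (if (pvSigWords (PySem.List.pyGetD messages (-1) [])).isEmpty then false
          else ((pvSigWords (PySem.List.pyGetD messages (-1) []) : List String).foldl
            (fun st w => (pvOcc (PySem.List.slice messages none (some (-1))) w).foldl pvCStep st)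
            (PySem.Dict.empty, false)).2)
    rw [PySem.List.foldl_append_singleton_eq_map]
    simp only [List.nil_append, List.length_map, if_neg h]
    have hlen : 1 ≤ messages.length := by omega
    have h1 : PySem.List.pyGetD (List.map pvSigWords messages) (-1) PySem.Set.empty
        = pvSigWords messages[messages.length - 1] := by
      rw [PySem.List.pyGetD_neg_ofNat _ 1 _ (by omega) (by simpa using hlen)]
      simp
    have h2 : PySem.List.pyGetD messages (-1) ([] : List (String × String))
        = messages[messages.length - 1] := by
      rw [PySem.List.pyGetD_neg_ofNat messages 1 _ (by omega) hlen]
    simp only [h1, h2, PySem.List.slice_to_neg_one]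
    set last := pvSigWords messages[messages.length - 1] with hLdef
    set earlier := messages.dropLast with hEdef
    have hempty : (PySem.Set.len last = 0) ↔ ((last : List String).isEmpty = true) := by
      simp only [PySem.Set.len, List.isEmpty_iff_length_eq_zero, Nat.cast_eq_zero]
    by_cases hE : (last : List String).isEmpty = true
    · rw [if_pos (hempty.mpr hE), if_pos hE]
    · rw [if_neg (fun hh => hE (hempty.mp hh)), if_neg hE]
      rw [pv_foldl_flatMap (last : List String) (fun w => pvOcc earlier w) pvCStep]
      rw [Bool.eq_iff_iff]
      rw [pv_count_loop _ PySem.Dict.empty (by intro j; rw [PySem.Dict.getD_empty]; omega)]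
      have hchain : (∃ j : Int, 2 ≤ PySem.Dict.empty.getD j 0 + (((last : List String).flatMap (fun w => pvOcc earlier w)).count j : Int))
          ↔ ∃ p ∈ PySem.List.enumerate earlier, 2 ≤ ((last : List String).countP (fun w => (pvSigWords p.2).contains w) : Int) := by
        rw [← pv_exists_sum _ _ (PySem.List.pairwise_lt_enumerate _ _) (fun p => Int.natCast_nonneg _)]
        constructor
        · rintro ⟨j, hj⟩
          exact ⟨j, by rw [← pv_seq_count]; rw [PySem.Dict.getD_empty] at hj; omega⟩
        · rintro ⟨j, hj⟩
          exact ⟨j, by rw [PySem.Dict.getD_empty, pv_seq_count]; omega⟩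
      rw [hchain]
      have hpred : ∀ (S : PySem.Set String),
          (2 ≤ PySem.Set.len (PySem.Set.inter last S))
            ↔ (2 ≤ ((last : List String).countP (fun w => S.contains w) : Int)) := by
        intro S
        unfold PySem.Set.len PySem.Set.inter
        rw [← List.countP_eq_length_filter]
      rw [← List.map_dropLast, ← hEdef, List.any_map, List.any_eq_true]
      constructor
      · rintro ⟨msg, hmsg, hdec⟩
        obtain ⟨k, hk, rfl⟩ := List.mem_iff_getElem.mp hmsg
        simp only [Function.comp_apply] at hdec
        refine ⟨_, (PySem.List.mem_enumerate_iff _ _ _).mpr ⟨k, hk, rfl⟩, ?_⟩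
        show 2 ≤ ((last : List String).countP (fun w => (pvSigWords earlier[k]).contains w) : Int)
        exact (hpred _).mp (of_decide_eq_true hdec)
      · rintro ⟨p, hp, hcnt⟩
        have hmem : p.2 ∈ earlier := by
          have hm := List.mem_map_of_mem (f := fun q : Int × List (String × String) => q.2) hp
          rwa [PySem.List.map_snd_enumerate] at hm
        refine ⟨p.2, hmem, ?_⟩
        simp only [Function.comp_apply]
        exact decide_eq_true ((hpred _).mpr hcnt)

-- ===== VERDICT (by name: the statement is the Claim_ definition above) =====
theorem check_topic_repetition_py_spec : Claim_equal_check_topic_repetition_py := by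
  intro messages _
  unfold Spec_check_topic_repetition_py
  exact pv_main messages
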